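-- pv_equiv track=rewrite | github.com/scienceguy131/RMC-ComputerScience | MohammedFinalAssignment/Dictionary-assignment.py | dictionary_maker
-- ===== SOURCE A (Python) =====
-- def dictionary_maker(text):
--     dictionary = {}
--     for x in range(len(text)):
--
--         if text[x].isupper():
--             dictionary[text[x]] = text[x]
--             for y in range(x+1, len(text)):
--
--                 if text[y].islower() or text[y] == "-":
--                     dictionary[text[x]] = dictionary[text[x]] + text[y]
--
--                 else:
--                     break
--
--     return dictionary
-- ===== SOURCE B (Python) =====
-- def dictionary_maker(text):
--     dictionary = {}
--     key = None
--     for c in text: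
--         if c.isupper():
--             key = c
--             dictionary[key] = c
--         elif key is not None and (c.islower() or c == "-"):
--             dictionary[key] += c
--         else:
--             key = None
--     return dictionary
-- ===== Notes on version B (the rewrite author's own statement) =====
-- stated objective: simpler
-- what changed: Replaces A's nested loops (for every uppercase position an inner loop re-reads the following lowercase run) by a single flat pass that keeps the current uppercase key as state.
import Mathlib
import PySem

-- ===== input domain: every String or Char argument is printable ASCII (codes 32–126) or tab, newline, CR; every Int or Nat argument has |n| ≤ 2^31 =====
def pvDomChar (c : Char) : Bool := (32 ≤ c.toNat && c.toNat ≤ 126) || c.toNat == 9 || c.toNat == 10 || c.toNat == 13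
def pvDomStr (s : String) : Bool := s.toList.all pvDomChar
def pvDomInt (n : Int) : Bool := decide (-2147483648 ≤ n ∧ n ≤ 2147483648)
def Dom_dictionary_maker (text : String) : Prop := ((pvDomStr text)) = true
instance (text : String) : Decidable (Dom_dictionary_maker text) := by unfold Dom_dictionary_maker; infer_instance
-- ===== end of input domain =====

-- B replaces A's nested re-scanning inner loop by one linear pass keeping the current uppercase key as state (simpler flat state machine, same dict).

-- ===== PORT A =====
-- inner loop: 'for y in range(x+1, len(text)): if lower/'-': d[k] = d[k] + c else: break',
-- transcribed as structural recursion over the remaining characters; d[k] always exists here,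
-- so Python's d[k] lookup is ported as getD with "" (never hit).
def dmInnerA (k : String) (d : PySem.Dict String String) : List Char → PySem.Dict String String
  | [] => d
  | c :: rest =>
    if PySem.Chars.islower c || c == '-' then
      dmInnerA k (d.insert k (d.getD k "" ++ String.singleton c)) rest
    else d

-- outer loop: 'for x in range(len(text)): if text[x].isupper(): d[text[x]] = text[x]; <inner loop>'
def dmOuterA (d : PySem.Dict String String) : List Char → PySem.Dict String String
  | [] => d
  | c :: rest =>
    if PySem.Chars.isupper c then
      dmOuterA (dmInnerA (String.singleton c) ((d.insert (String.singleton c) (String.singleton c))) rest) rest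
    else dmOuterA d rest

def dictionary_maker (text : String) : List (String × String) :=
  (dmOuterA PySem.Dict.empty text.toList).items

-- ===== PORT B =====
-- one step of B's state machine: state = (current key or none, dict)
def dmStepB (st : Option String × PySem.Dict String String) (c : Char) :
    Option String × PySem.Dict String String :=
  if PySem.Chars.isupper c then
    (some (String.singleton c), st.2.insert (String.singleton c) (String.singleton c))
  else
    match st.1 with
    | some k =>
      if PySem.Chars.islower c || c == '-' then
        (some k, st.2.insert k (st.2.getD k "" ++ String.singleton c))
      else (none, st.2)
    | none => (none, st.2)

def dictionary_maker_alt (text : String) : List (String × String) :=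
  (text.toList.foldl dmStepB (none, PySem.Dict.empty)).2.items

-- ===== PRECONDITION & SPEC =====
def Spec_dictionary_maker (text : String) (out : List (String × String)) : Prop := out = dictionary_maker_alt text
instance (text : String) (out : List (String × String)) : Decidable (Spec_dictionary_maker text out) := by unfold Spec_dictionary_maker; infer_instance

-- ===== CLAIM (what is proved, stated in full; the proofs are below) =====
def Claim_equal_dictionary_maker : Prop := ∀ (text : String), Dom_dictionary_maker text → Spec_dictionary_maker text (dictionary_maker text)

-- ===== LEMMAS AND PROOFS =====

-- an uppercase letter is neither a lowercase letter nor '-'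
lemma upper_not_lower_hyphen (c : Char) (h : PySem.Chars.isupper c = true) :
    (PySem.Chars.islower c || c == '-') = false := by
  unfold PySem.Chars.isupper PySem.Chars.islower at *
  simp only [Bool.and_eq_true, decide_eq_true_eq, Char.le_def, UInt32.le_iff_toNat_le] at h
  simp only [Bool.or_eq_false_iff, Bool.and_eq_false_iff, decide_eq_false_iff_not, Char.le_def,
    UInt32.le_iff_toNat_le, beq_eq_false_iff_ne, ne_eq]
  have hA : 'A'.val.toNat = 65 := by decide
  have hZ : 'Z'.val.toNat = 90 := by decide
  have ha : 'a'.val.toNat = 97 := by decide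
  refine ⟨Or.inl ?_, ?_⟩
  · omega
  · intro hc; subst hc; revert h; decide

-- the single pass agrees with the nested loops, for both key states
lemma fold_eq_outer (cs : List Char) :
    (∀ d k, (List.foldl dmStepB (some k, d) cs).2 = dmOuterA (dmInnerA k d cs) cs) ∧
    (∀ d, (List.foldl dmStepB (none, d) cs).2 = dmOuterA d cs) := by
  induction cs with
  | nil => exact ⟨fun d k => rfl, fun d => rfl⟩
  | cons c rest ih =>
    constructor
    · intro d k
      by_cases hu : PySem.Chars.isupper c = true
      · simp only [List.foldl_cons, dmStepB, hu, if_pos, dmOuterA, dmInnerA,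
          upper_not_lower_hyphen c hu, Bool.false_eq_true, if_false]
        exact ih.1 _ _
      · by_cases hl : (PySem.Chars.islower c || c == '-') = true
        · simp only [List.foldl_cons, dmStepB, hu, if_false, hl, if_pos, dmOuterA, dmInnerA,
            Bool.false_eq_true]
          exact ih.1 _ _
        · simp only [List.foldl_cons, dmStepB, hu, hl, if_false, dmOuterA, dmInnerA,
            Bool.false_eq_true]
          exact ih.2 _
    · intro d
      by_cases hu : PySem.Chars.isupper c = true
      · simp only [List.foldl_cons, dmStepB, hu, if_pos, dmOuterA]
        exact ih.1 _ _
      · simp only [List.foldl_cons, dmStepB, hu, dmOuterA]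
        exact ih.2 _

-- ===== VERDICT (by name: the statement is the Claim_ definition above) =====
theorem dictionary_maker_spec : Claim_equal_dictionary_maker := by
  intro text _
  unfold Spec_dictionary_maker dictionary_maker dictionary_maker_alt
  rw [(fold_eq_outer text.toList).2]
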